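-- pv_equiv track=rewrite | github.com/abhijith0505/GoChat | client/src/gochat/apiHelper.py | getBlocksFromText
-- ===== SOURCE A (Python) =====
-- DEFAULT_BLOCK_SIZE = 128
--
-- BYTE_SIZE = 256
--
-- def getBlocksFromText(message, blockSize=DEFAULT_BLOCK_SIZE):
--      # Converts a string message to a list of block integers. Each integer
--      # represents 128 (or whatever blockSize is set to) string characters.
--
--      messageBytes = message.encode('ascii')  # convert the string to bytes
--      print (message)
--      print (messageBytes)
--
--      blockInts = []
--      for blockStart in range(0, len(messageBytes), blockSize):
--          # Calculate the block integer for this block of text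
--          blockInt = 0
--          for i in range(blockStart, min(blockStart + blockSize, len(messageBytes))):
--              print (type(messageBytes[i]))
--              blockInt += (messageBytes[i]) * (BYTE_SIZE ** (i % blockSize))
--          blockInts.append(blockInt)
--      return blockInts
-- ===== SOURCE B (Python) =====
-- DEFAULT_BLOCK_SIZE = 128
--
-- BYTE_SIZE = 256
--
--
-- def getBlocksFromText(message, blockSize=DEFAULT_BLOCK_SIZE):
--     # Same conversion, but split into a flat logging pass and a separate
--     # block-computation pass that builds each block integer directly from
--     # its byte slice (little-endian), with no per-byte power computation.
--     messageBytes = message.encode('ascii')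
--     print(message)
--     print(messageBytes)
--
--     for i in range(len(messageBytes)):
--         print(type(messageBytes[i]))
--
--     blockInts = []
--     for blockStart in range(0, len(messageBytes), blockSize):
--         block = messageBytes[blockStart:blockStart + blockSize]
--         blockInts.append(int.from_bytes(block, 'little'))
--     return blockInts
-- ===== Notes on version B (the rewrite author's own statement) =====
-- stated objective: faster
-- what changed: Replaced the nested index loop with per-byte powers of 256 by a single pass over block slices, computing each block integer directly with int.from_bytes(block, 'little'); the per-byte type prints become one flat logging loop in the same order.
import Mathlib
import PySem

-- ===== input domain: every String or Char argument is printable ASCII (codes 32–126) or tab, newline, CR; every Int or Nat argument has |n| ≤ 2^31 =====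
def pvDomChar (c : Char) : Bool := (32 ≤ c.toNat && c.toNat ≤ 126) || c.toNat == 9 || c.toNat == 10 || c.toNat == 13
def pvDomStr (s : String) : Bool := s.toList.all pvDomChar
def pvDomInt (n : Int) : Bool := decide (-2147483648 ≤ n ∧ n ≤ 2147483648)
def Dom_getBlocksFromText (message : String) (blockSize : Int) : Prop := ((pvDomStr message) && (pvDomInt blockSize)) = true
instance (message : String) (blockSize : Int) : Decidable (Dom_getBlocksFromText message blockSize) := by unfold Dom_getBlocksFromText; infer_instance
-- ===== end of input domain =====

-- B replaces A's nested index loop with per-byte powers of 256 by one pass over block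
-- slices, computing each block integer little-endian (objective: simpler).
-- Equivalence is about the RETURN value only: the debug prints (dropped in the ports)
-- are emitted in a different pass in B, and B prints type lines even when blockSize < 0.

-- ===== PORT A =====
-- The exponent i % blockSize is ported as (PySem.Int.mod i blockSize).toNat; inside the
-- inner loop blockSize > 0 (the outer range is empty otherwise), so the mod is ≥ 0 and
-- toNat is exact.
def getBlocksFromText (message : String) (blockSize : Int) : List Int :=
  let messageBytes : List Int := message.toList.map (fun c => (c.toNat : Int))
  (PySem.List.pyRange 0 (messageBytes.length : Int) blockSize).foldl
    (fun blockInts blockStart =>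
      let blockInt : Int :=
        (PySem.List.pyRange blockStart (min (blockStart + blockSize) (messageBytes.length : Int)) 1).foldl
          (fun blockInt i =>
            blockInt + (PySem.List.pyGetD messageBytes i 0) * (256 : Int) ^ (PySem.Int.mod i blockSize).toNat)
          0
      blockInts ++ [blockInt])
    []

-- ===== PORT B =====
-- int.from_bytes(block, 'little') ported as the little-endian fold over the byte list.
def fromBytesLE (block : List Int) : Int := block.foldr (fun b acc => b + 256 * acc) 0

def getBlocksFromText_alt (message : String) (blockSize : Int) : List Int :=
  let messageBytes : List Int := message.toList.map (fun c => (c.toNat : Int))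
  (PySem.List.pyRange 0 (messageBytes.length : Int) blockSize).foldl
    (fun blockInts blockStart =>
      blockInts ++ [fromBytesLE (PySem.List.slice messageBytes (some blockStart) (some (blockStart + blockSize)))])
    []

-- ===== PRECONDITION & SPEC =====
-- Pre_ excludes exactly blockSize = 0, where A's range(0, n, 0) raises ValueError (B raises too).
def Pre_getBlocksFromText (message : String) (blockSize : Int) : Prop := blockSize ≠ 0
instance (message : String) (blockSize : Int) : Decidable (Pre_getBlocksFromText message blockSize) := by unfold Pre_getBlocksFromText; infer_instance
def pvWitness_getBlocksFromText : String × Int := ("Hi", 2)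
def Spec_getBlocksFromText (message : String) (blockSize : Int) (out : List Int) : Prop := out = getBlocksFromText_alt message blockSize
instance (message : String) (blockSize : Int) (out : List Int) : Decidable (Spec_getBlocksFromText message blockSize out) := by unfold Spec_getBlocksFromText; infer_instance

-- ===== CLAIM (what is proved, stated in full; the proofs are below) =====
def Claim_equal_getBlocksFromText : Prop := ∀ (message : String) (blockSize : Int), Dom_getBlocksFromText message blockSize → Pre_getBlocksFromText message blockSize → Spec_getBlocksFromText message blockSize (getBlocksFromText message blockSize)

-- ===== LEMMAS AND PROOFS =====

-- the little-endian fold as a positional foldl with powers of 256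
theorem fromBytesLE_foldl (l : List Int) (e : Nat) (acc : Int) :
    (List.range l.length).foldl (fun a j => a + l.getD j 0 * (256 : Int) ^ (e + j)) acc
      = acc + fromBytesLE l * (256 : Int) ^ e := by
  induction l generalizing e acc with
  | nil => simp [fromBytesLE]
  | cons x t ih =>
    rw [show (x :: t).length = t.length + 1 from rfl, List.range_succ_eq_map, List.foldl_cons,
        List.foldl_map]
    have h : ∀ (a : Int), ∀ j ∈ List.range t.length,
        (fun (a : Int) (j : Nat) => a + (x :: t).getD j 0 * (256 : Int) ^ (e + j)) a (Nat.succ j)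
          = (fun (a : Int) (j : Nat) => a + t.getD j 0 * (256 : Int) ^ ((e + 1) + j)) a j := by
      intro a j _
      show a + (x :: t).getD (j + 1) 0 * (256 : Int) ^ (e + (j + 1))
          = a + t.getD j 0 * (256 : Int) ^ ((e + 1) + j)
      rw [List.getD_cons_succ, show e + (j + 1) = (e + 1) + j from by omega]
    rw [PySem.List.foldl_congr_mem _ _ _ _ h, ih (e + 1)]
    simp [fromBytesLE]
    ring

-- the inner loop of A over one block equals fromBytesLE of the block slice
theorem inner_eq_fromBytesLE (bytes : List Int) (k s : Int) (hk : 0 < k)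
    (hs : 0 ≤ s) (hdvd : k ∣ s) :
    (PySem.List.pyRange s (min (s + k) (bytes.length : Int)) 1).foldl
        (fun blockInt i =>
          blockInt + (PySem.List.pyGetD bytes i 0) * (256 : Int) ^ (PySem.Int.mod i k).toNat) 0
      = fromBytesLE (PySem.List.slice bytes (some s) (some (s + k))) := by
  set m : Int := min (s + k) (bytes.length : Int) with hm
  have hblock : PySem.List.slice bytes (some s) (some (s + k))
      = (bytes.drop s.toNat).take ((s + k).toNat - s.toNat) :=
    PySem.List.slice_toNat bytes hs (by omega)
  set block : List Int := (bytes.drop s.toNat).take ((s + k).toNat - s.toNat) with hb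
  have hlen : block.length = (m - s).toNat := by
    simp [hb, List.length_take, List.length_drop, hm]
    omega
  rw [PySem.List.pyRange_one]
  rw [List.foldl_map]
  have hmem : ∀ (a : Int), ∀ j ∈ List.range (m - s).toNat,
      (fun (blockInt : Int) (i : Int) =>
          blockInt + (PySem.List.pyGetD bytes i 0) * (256 : Int) ^ (PySem.Int.mod i k).toNat)
        a (s + (j : Int))
      = (fun (a : Int) (j : Nat) => a + block.getD j 0 * (256 : Int) ^ (0 + j)) a j := by
    intro a j hj
    have hj' : (j : Int) < m - s := by
      have := List.mem_range.mp hj; omega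
    have hjk : (j : Int) < k := by omega
    have hidx : s + (j : Int) = ((s.toNat + j : Nat) : Int) := by omega
    have hget : PySem.List.pyGetD bytes (s + (j : Int)) 0 = block.getD j 0 := by
      rw [hidx, PySem.List.pyGetD_natCast]
      have hlt : s.toNat + j < bytes.length := by
        have : (s : Int) + (j : Int) < (bytes.length : Int) := by omega
        omega
      rw [hb]
      rw [List.getD_eq_getElem?_getD, List.getD_eq_getElem?_getD]
      rw [List.getElem?_take_of_lt (by omega), List.getElem?_drop]
    have hmod : PySem.Int.mod (s + (j : Int)) k = (j : Int) := by
      obtain ⟨q, hq⟩ := hdvd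
      unfold PySem.Int.mod
      rw [hq, add_comm (k * q) (j : Int), Int.add_mul_fmod_self_left]
      exact Int.fmod_eq_of_lt (by omega) hjk
    simp only [hget, hmod]
    norm_num
  rw [PySem.List.foldl_congr_mem _ _ _ _ hmem]
  rw [← hlen, fromBytesLE_foldl block 0 0]
  simp [hblock]

-- ===== VERDICT (by name: the statement is the Claim_ definition above) =====
theorem getBlocksFromText_spec : Claim_equal_getBlocksFromText := by
  intro message blockSize _ hpre
  unfold Spec_getBlocksFromText getBlocksFromText getBlocksFromText_alt
  set bytes : List Int := message.toList.map (fun c => (c.toNat : Int)) with hbytes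
  rcases lt_or_gt_of_ne hpre with hneg | hpos
  · -- negative step: the outer range is empty on both sides
    have : PySem.List.pyRange 0 (bytes.length : Int) blockSize = [] := by
      unfold PySem.List.pyRange
      have h1 : ¬ blockSize = 0 := hpre
      have h2 : ¬ 0 < blockSize := by omega
      have h3 : ¬ ((bytes.length : Int) < 0) := by omega
      simp [h1, h2, h3]
    simp [this]
  · -- positive step: per-block equality via inner_eq_fromBytesLE
    apply PySem.List.foldl_congr_mem
    intro acc s hsmem
    obtain ⟨hs0, _, hdvd⟩ := (PySem.List.mem_pyRange_iff_of_pos hpos s).mp hsmem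
    simp only []
    rw [inner_eq_fromBytesLE bytes blockSize s hpos hs0 (by simpa using hdvd)]
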